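-- pv_equiv track=rewrite | github.com/anoubhav/Codeforces-Atcoder-Codechef-solutions | Codechef/July cookoff/b.py | trick_brute
-- ===== SOURCE A (Python) =====
-- def trick_brute(nums, n):
--     # https://www.youtube.com/watch?v=4roaMb_v-qQ
--     if n>60:
--         return 'NO'
--     seen = set()
--
--     # O(N^2) brute when N < 60
--     ans = 'YES'
--     for i in range(n):
--         orprod = 0
--         for j in range(i, n):
--             orprod |= nums[j]
--             if orprod in seen:
--                 ans = 'NO'
--                 break
--             else: seen.add(orprod)
--     return ans
-- ===== SOURCE B (Python) =====
-- def trick_brute(nums, n):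
--     # Frontier method: ORs of subarrays ending at j are derived from those ending at j-1.
--     if n > 60:
--         return 'NO'
--     all_ors = set()
--     prev = set()
--     total = 0
--     for j in range(n):
--         x = nums[j]
--         cur = {x | v for v in prev}
--         cur.add(x)
--         all_ors |= cur
--         prev = cur
--         total += j + 1
--     return 'YES' if len(all_ors) == total else 'NO'
-- ===== Notes on version B (the rewrite author's own statement) =====
-- stated objective: alternative
-- what changed: Replaces the O(n^2) double loop with a break and a global seen-set by the frontier technique: the set of ORs of subarrays ending at j is built from the previous frontier in one pass, and the answer compares the number of distinct OR values with the number of subarrays.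
import Mathlib
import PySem

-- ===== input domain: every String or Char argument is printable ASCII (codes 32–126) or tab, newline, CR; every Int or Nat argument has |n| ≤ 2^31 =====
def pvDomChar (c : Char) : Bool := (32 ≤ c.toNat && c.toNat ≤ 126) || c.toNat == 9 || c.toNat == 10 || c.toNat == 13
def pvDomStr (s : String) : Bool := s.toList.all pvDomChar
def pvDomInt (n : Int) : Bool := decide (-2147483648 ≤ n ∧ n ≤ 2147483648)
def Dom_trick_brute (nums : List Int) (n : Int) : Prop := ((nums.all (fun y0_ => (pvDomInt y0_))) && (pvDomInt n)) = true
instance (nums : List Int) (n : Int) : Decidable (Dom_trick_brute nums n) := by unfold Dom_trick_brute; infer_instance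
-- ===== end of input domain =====

-- B replaces A's O(n^2) double loop (break + one global seen-set) by the frontier technique
-- (the set of subarray ORs ending at j, derived from the previous frontier) and a final count comparison.

-- ===== PORT A =====
-- inner 'for j in range(i, n)' loop with its break: returns the updated (seen, ans)
def trickInner (nums : List Int) : List Int → Int → PySem.Set Int → String → PySem.Set Int × String
  | [], _, seen, ans => (seen, ans)
  | j :: js, orprod, seen, ans =>
    let orprod' := PySem.Int.bor orprod (PySem.List.pyGetD nums j 0)
    if PySem.Set.contains seen orprod' then (seen, "NO")
    else trickInner nums js orprod' (PySem.Set.add seen orprod') ans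

def trick_brute (nums : List Int) (n : Int) : String :=
  if n > 60 then "NO"
  else
    let st := (PySem.List.pyRange 0 n 1).foldl
      (fun (st : PySem.Set Int × String) i =>
        trickInner nums (PySem.List.pyRange i n 1) 0 st.1 st.2)
      (PySem.Set.empty, "YES")
    st.2

-- ===== PORT B =====
def trick_brute_alt (nums : List Int) (n : Int) : String :=
  if n > 60 then "NO"
  else
    let st := (PySem.List.pyRange 0 n 1).foldl
      (fun (st : PySem.Set Int × PySem.Set Int × Int) j =>
        let x := PySem.List.pyGetD nums j 0
        let cur := PySem.Set.add (PySem.Set.ofList (st.2.1.map (fun v => PySem.Int.bor x v))) x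
        (PySem.Set.union st.1 cur, cur, st.2.2 + j + 1))
      (PySem.Set.empty, PySem.Set.empty, 0)
    if PySem.Set.len st.1 = st.2.2 then "YES" else "NO"

-- ===== PRECONDITION & SPEC =====
-- Pre_ excludes exactly the inputs where Python A raises IndexError: when the guard does not
-- short-circuit (n ≤ 60), every index in range(n) must exist in nums.
def Pre_trick_brute (nums : List Int) (n : Int) : Prop := n ≤ 60 → n ≤ (nums.length : Int)
instance (nums : List Int) (n : Int) : Decidable (Pre_trick_brute nums n) := by unfold Pre_trick_brute; infer_instance
def pvWitness_trick_brute : List Int × Int := ([1, 2, 3], 3)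

def Spec_trick_brute (nums : List Int) (n : Int) (out : String) : Prop := out = trick_brute_alt nums n
instance (nums : List Int) (n : Int) (out : String) : Decidable (Spec_trick_brute nums n out) := by unfold Spec_trick_brute; infer_instance

-- ===== CLAIM (what is proved, stated in full; the proofs are below) =====
def Claim_equal_trick_brute : Prop := ∀ (nums : List Int) (n : Int), Dom_trick_brute nums n → Pre_trick_brute nums n → Spec_trick_brute nums n (trick_brute nums n)

-- ===== LEMMAS AND PROOFS =====

-- element read, total (default never used inside Pre_)
def nm (nums : List Int) (k : Int) : Int := PySem.List.pyGetD nums k 0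

-- OR of nums[i..j] (inclusive), the value both programs associate with subarray (i, j)
def vOr (nums : List Int) (i j : Int) : Int :=
  (PySem.List.pyRange i (j + 1) 1).foldl (fun a k => PySem.Int.bor a (nm nums k)) 0

-- successive values pushed by A's inner loop: running ORs of nums[j] over js, seeded with p
def prefOrs (nums : List Int) : Int → List Int → List Int
  | _, [] => []
  | p, j :: js =>
    PySem.Int.bor p (nm nums j) :: prefOrs nums (PySem.Int.bor p (nm nums j)) js

-- row-major list of all subarray ORs (A's traversal order)
def rowVals (nums : List Int) (n : Int) : List Int :=
  (PySem.List.pyRange 0 n 1).flatMap (fun i => prefOrs nums 0 (PySem.List.pyRange i n 1))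

-- column-major list of all subarray ORs (B's traversal order)
def colVals (nums : List Int) (t : Int) : List Int :=
  (PySem.List.pyRange 0 t 1).flatMap
    (fun j => (PySem.List.pyRange 0 (j + 1) 1).map (fun i => vOr nums i j))

lemma vOr_base (nums : List Int) (i : Int) : vOr nums i (i - 1) = 0 := by
  unfold vOr
  rw [show i - 1 + 1 = i by ring, PySem.List.pyRange_one_eq_nil le_rfl]
  rfl

lemma vOr_self (nums : List Int) (i : Int) : vOr nums i i = nm nums i := by
  unfold vOr
  rw [PySem.List.pyRange_one_singleton]
  simp [PySem.Int.bor_comm, PySem.Int.bor_zero]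

lemma vOr_succ (nums : List Int) {i j : Int} (h : i ≤ j) :
    vOr nums i j = PySem.Int.bor (vOr nums i (j - 1)) (nm nums j) := by
  unfold vOr
  rw [show j - 1 + 1 = j by ring,
    PySem.List.pyRange_one_succ_right h, List.foldl_append]
  rfl

lemma prefOrs_eq_map (nums : List Int) (i : Int) :
    ∀ (a b : Int), i ≤ a →
      prefOrs nums (vOr nums i (a - 1)) (PySem.List.pyRange a b 1) =
        (PySem.List.pyRange a b 1).map (vOr nums i) := by
  have main : ∀ (k : Nat) (a b : Int), (b - a).toNat = k → i ≤ a →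
      prefOrs nums (vOr nums i (a - 1)) (PySem.List.pyRange a b 1) =
        (PySem.List.pyRange a b 1).map (vOr nums i) := by
    intro k
    induction k with
    | zero =>
      intro a b hk _
      rw [PySem.List.pyRange_one_eq_nil (by omega)]
      rfl
    | succ k ih =>
      intro a b hk ha
      have hab : a < b := by omega
      rw [PySem.List.pyRange_one_cons hab]
      show PySem.Int.bor (vOr nums i (a - 1)) (nm nums a) ::
          prefOrs nums (PySem.Int.bor (vOr nums i (a - 1)) (nm nums a))
            (PySem.List.pyRange (a + 1) b 1) = _
      rw [← vOr_succ nums ha, List.map_cons]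
      have h2 := ih (a + 1) b (by omega) (by omega)
      rw [show a + 1 - 1 = a by ring] at h2
      rw [h2]
  intro a b ha
  exact main (b - a).toNat a b rfl ha

lemma trickInner_step (nums : List Int) (j : Int) (js : List Int) (p : Int)
    (seen : PySem.Set Int) (ans : String) :
    trickInner nums (j :: js) p seen ans =
      (if PySem.Set.contains seen (PySem.Int.bor p (nm nums j)) then (seen, "NO")
       else trickInner nums js (PySem.Int.bor p (nm nums j))
         (PySem.Set.add seen (PySem.Int.bor p (nm nums j))) ans) := rfl

lemma trickInner_yes (nums : List Int) :
    ∀ (js : List Int) (p : Int) (seen : PySem.Set Int) (ans : String),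
      (seen ++ prefOrs nums p js).Nodup →
      trickInner nums js p seen ans = (seen ++ prefOrs nums p js, ans) := by
  intro js
  induction js with
  | nil => intro p seen ans _; simp [trickInner, prefOrs]
  | cons j js ih =>
    intro p seen ans h
    rw [show prefOrs nums p (j :: js) =
      PySem.Int.bor p (nm nums j) :: prefOrs nums (PySem.Int.bor p (nm nums j)) js from rfl] at h ⊢
    set q := PySem.Int.bor p (nm nums j) with hq
    have hqseen : q ∉ seen := by
      intro hmem
      exact ((List.nodup_append.mp h).2.2 q hmem q (by simp)) rfl
    rw [List.append_cons] at h ⊢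
    rw [trickInner_step, if_neg (by simp; exact hqseen),
      PySem.Set.add_of_not_mem hqseen]
    exact ih q (seen ++ [q]) ans h

lemma trickInner_no (nums : List Int) :
    ∀ (js : List Int) (p : Int) (seen : PySem.Set Int) (ans : String),
      seen.Nodup → ¬ (seen ++ prefOrs nums p js).Nodup →
      (trickInner nums js p seen ans).2 = "NO" := by
  intro js
  induction js with
  | nil => intro p seen ans hs h; exact absurd (by simpa [prefOrs] using hs) h
  | cons j js ih =>
    intro p seen ans hs h
    rw [show prefOrs nums p (j :: js) =
      PySem.Int.bor p (nm nums j) :: prefOrs nums (PySem.Int.bor p (nm nums j)) js from rfl] at h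
    set q := PySem.Int.bor p (nm nums j) with hq
    rw [trickInner_step]
    by_cases hqseen : q ∈ seen
    · rw [if_pos (by simpa using hqseen)]
    · rw [if_neg (by simp; exact hqseen), PySem.Set.add_of_not_mem hqseen]
      refine ih q (seen ++ [q]) ans ?_ ?_
      · rw [List.nodup_append]
        refine ⟨hs, List.nodup_singleton q, ?_⟩
        intro a ha b hb
        simp at hb
        subst hb
        exact fun heq => hqseen (heq ▸ ha)
      · rw [← List.append_cons]; exact h

lemma trickInner_ans (nums : List Int) :
    ∀ (js : List Int) (p : Int) (seen : PySem.Set Int) (ans : String),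
      (trickInner nums js p seen ans).2 = ans ∨ (trickInner nums js p seen ans).2 = "NO" := by
  intro js
  induction js with
  | nil => intro p seen ans; left; rfl
  | cons j js ih =>
    intro p seen ans
    rw [trickInner_step]
    split_ifs with hc
    · right; rfl
    · exact ih _ _ ans

lemma outer_stay_no (nums : List Int) (n : Int) :
    ∀ (is : List Int) (seen : PySem.Set Int),
      ((is.foldl (fun (st : PySem.Set Int × String) i =>
          trickInner nums (PySem.List.pyRange i n 1) 0 st.1 st.2) (seen, "NO"))).2 = "NO" := by
  intro is
  induction is with
  | nil => intro seen; rfl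
  | cons i is ih =>
    intro seen
    rw [List.foldl_cons]
    rcases trickInner_ans nums (PySem.List.pyRange i n 1) 0 seen "NO" with h | h <;>
      · have : trickInner nums (PySem.List.pyRange i n 1) 0 seen "NO" =
          ((trickInner nums (PySem.List.pyRange i n 1) 0 seen "NO").1, "NO") :=
          Prod.ext_iff.mpr ⟨rfl, h⟩
        rw [this]
        exact ih _

lemma outer_yes (nums : List Int) (n : Int) :
    ∀ (is : List Int) (seen : PySem.Set Int) (ans : String),
      (seen ++ is.flatMap (fun i => prefOrs nums 0 (PySem.List.pyRange i n 1))).Nodup →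
      is.foldl (fun (st : PySem.Set Int × String) i =>
          trickInner nums (PySem.List.pyRange i n 1) 0 st.1 st.2) (seen, ans) =
        (seen ++ is.flatMap (fun i => prefOrs nums 0 (PySem.List.pyRange i n 1)), ans) := by
  intro is
  induction is with
  | nil => intro seen ans _; simp
  | cons i is ih =>
    intro seen ans h
    rw [List.flatMap_cons, ← List.append_assoc] at h ⊢
    rw [List.foldl_cons,
      trickInner_yes nums (PySem.List.pyRange i n 1) 0 seen ans (h.of_append_left ..)]
    exact ih _ ans h

lemma outer_no (nums : List Int) (n : Int) :
    ∀ (is : List Int) (seen : PySem.Set Int) (ans : String),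
      seen.Nodup →
      ¬ (seen ++ is.flatMap (fun i => prefOrs nums 0 (PySem.List.pyRange i n 1))).Nodup →
      ((is.foldl (fun (st : PySem.Set Int × String) i =>
          trickInner nums (PySem.List.pyRange i n 1) 0 st.1 st.2) (seen, ans))).2 = "NO" := by
  intro is
  induction is with
  | nil => intro seen ans hs h; exact absurd (by simpa using hs) h
  | cons i is ih =>
    intro seen ans hs h
    rw [List.flatMap_cons, ← List.append_assoc] at h
    rw [List.foldl_cons]
    by_cases hrow : (seen ++ prefOrs nums 0 (PySem.List.pyRange i n 1)).Nodup
    · rw [trickInner_yes nums (PySem.List.pyRange i n 1) 0 seen ans hrow]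
      exact ih _ ans hrow h
    · have h2 := trickInner_no nums (PySem.List.pyRange i n 1) 0 seen ans hs hrow
      have : trickInner nums (PySem.List.pyRange i n 1) 0 seen ans =
          ((trickInner nums (PySem.List.pyRange i n 1) 0 seen ans).1, "NO") :=
        Prod.ext_iff.mpr ⟨rfl, h2⟩
      rw [this]
      exact outer_stay_no nums n is _

lemma trick_brute_char (nums : List Int) (n : Int) (h : ¬ n > 60) :
    trick_brute nums n = if (rowVals nums n).Nodup then "YES" else "NO" := by
  unfold trick_brute
  rw [if_neg h]
  by_cases hr : (rowVals nums n).Nodup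
  · rw [if_pos hr]
    have := outer_yes nums n (PySem.List.pyRange 0 n 1) PySem.Set.empty "YES"
      (by simpa [rowVals] using hr)
    simp only [this]
  · rw [if_neg hr]
    exact outer_no nums n (PySem.List.pyRange 0 n 1) PySem.Set.empty "YES"
      (by simp [PySem.Set.empty]) (by simpa [rowVals] using hr)

lemma cur_mem (nums : List Int) (m : Int) (P0 : PySem.Set Int) (hm : 0 ≤ m)
    (hP : ∀ x, x ∈ P0 ↔ ∃ i : Int, 0 ≤ i ∧ i < m ∧ x = vOr nums i (m - 1)) :
    ∀ y, y ∈ PySem.Set.add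
        (PySem.Set.ofList (P0.map (fun v => PySem.Int.bor (PySem.List.pyGetD nums m 0) v)))
        (PySem.List.pyGetD nums m 0) ↔
      ∃ i : Int, 0 ≤ i ∧ i ≤ m ∧ y = vOr nums i m := by
  intro y
  rw [PySem.Set.mem_add, PySem.Set.mem_ofList, List.mem_map]
  constructor
  · rintro (⟨v, hv, rfl⟩ | rfl)
    · obtain ⟨i, hi0, him, rfl⟩ := (hP v).mp hv
      refine ⟨i, hi0, by omega, ?_⟩
      rw [PySem.Int.bor_comm]
      exact (vOr_succ nums (by omega : i ≤ m)).symm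
    · exact ⟨m, hm, le_rfl, (vOr_self nums m).symm⟩
  · rintro ⟨i, hi0, him, rfl⟩
    by_cases h : i = m
    · subst h
      right
      exact vOr_self nums i
    · left
      refine ⟨vOr nums i (m - 1), (hP _).mpr ⟨i, hi0, by omega, rfl⟩, ?_⟩
      rw [PySem.Int.bor_comm]
      exact (vOr_succ nums (by omega : i ≤ m)).symm

lemma colVals_succ (nums : List Int) (m : Nat) :
    colVals nums ((m : Int) + 1) =
      colVals nums m ++
        (PySem.List.pyRange 0 ((m : Int) + 1) 1).map (fun i => vOr nums i m) := by
  unfold colVals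
  rw [PySem.List.pyRange_one_succ_right (by positivity : (0:Int) ≤ (m:Int)),
    List.flatMap_append]
  congr 1
  simp only [List.flatMap_cons, List.flatMap_nil, List.append_nil]
  rw [PySem.List.pyRange_one_succ_right (by positivity : (0:Int) ≤ (m:Int))]

-- B-side invariant
lemma alt_inv (nums : List Int) :
    ∀ (m : Nat),
      (let st := (PySem.List.pyRange 0 (m : Int) 1).foldl
        (fun (st : PySem.Set Int × PySem.Set Int × Int) j =>
          let x := PySem.List.pyGetD nums j 0
          let cur := PySem.Set.add (PySem.Set.ofList (st.2.1.map (fun v => PySem.Int.bor x v))) x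
          (PySem.Set.union st.1 cur, cur, st.2.2 + j + 1))
        (PySem.Set.empty, PySem.Set.empty, 0);
      st.1.Nodup ∧ (∀ x, x ∈ st.1 ↔ x ∈ colVals nums m) ∧
        (∀ x, x ∈ st.2.1 ↔ ∃ i : Int, 0 ≤ i ∧ i < (m : Int) ∧ x = vOr nums i ((m : Int) - 1)) ∧
        st.2.2 = ((colVals nums m).length : Int)) := by
  intro m
  induction m with
  | zero =>
    rw [show (((0:Nat)):Int) = 0 from rfl, PySem.List.pyRange_one_eq_nil le_rfl]
    refine ⟨List.nodup_nil, ?_, ?_, ?_⟩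
    · intro x
      simp [colVals, PySem.List.pyRange_one_eq_nil le_rfl, PySem.Set.empty]
    · intro x
      simp only [PySem.Set.empty]
      constructor
      · intro hx; simp at hx
      · rintro ⟨i, hi0, hi1, -⟩; omega
    · simp [colVals, PySem.List.pyRange_one_eq_nil le_rfl]
  | succ m ih =>
    obtain ⟨h1, h2, h3, h4⟩ := ih
    have hcast : ((m + 1 : Nat) : Int) = (m : Int) + 1 := by push_cast; ring
    rw [hcast, PySem.List.pyRange_one_succ_right (by positivity : (0:Int) ≤ (m:Int)),
      List.foldl_append, List.foldl_cons, List.foldl_nil]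
    set st := (PySem.List.pyRange 0 (m : Int) 1).foldl
      (fun (st : PySem.Set Int × PySem.Set Int × Int) j =>
        let x := PySem.List.pyGetD nums j 0
        let cur := PySem.Set.add (PySem.Set.ofList (st.2.1.map (fun v => PySem.Int.bor x v))) x
        (PySem.Set.union st.1 cur, cur, st.2.2 + j + 1))
      (PySem.Set.empty, PySem.Set.empty, 0) with hst
    have hcur := cur_mem nums (m : Int) st.2.1 (by positivity) h3
    refine ⟨?_, ?_, ?_, ?_⟩
    · exact PySem.Set.nodup_union _ _ h1
    · intro x
      show x ∈ PySem.Set.union st.1 _ ↔ _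
      rw [PySem.Set.mem_union, colVals_succ nums m, List.mem_append, h2]
      constructor
      · rintro (hx | hx)
        · exact Or.inl hx
        · right
          obtain ⟨i, hi0, him, rfl⟩ := (hcur x).mp hx
          exact List.mem_map.mpr ⟨i, PySem.List.mem_pyRange_one.mpr ⟨hi0, by omega⟩, rfl⟩
      · rintro (hx | hx)
        · exact Or.inl hx
        · right
          obtain ⟨i, hi, rfl⟩ := List.mem_map.mp hx
          obtain ⟨hi0, him⟩ := PySem.List.mem_pyRange_one.mp hi
          exact (hcur _).mpr ⟨i, hi0, by omega, rfl⟩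
    · intro x
      show x ∈ PySem.Set.add _ _ ↔ _
      rw [hcur x]
      constructor
      · rintro ⟨i, hi0, him, rfl⟩
        exact ⟨i, hi0, by omega, by rw [show ((m:Int) + 1 - 1) = (m:Int) by ring]⟩
      · rintro ⟨i, hi0, him, rfl⟩
        exact ⟨i, hi0, by omega, by rw [show ((m:Int) + 1 - 1) = (m:Int) by ring]⟩
    · show st.2.2 + (m : Int) + 1 = _
      rw [colVals_succ nums m, List.length_append, List.length_map,
        PySem.List.length_pyRange_one, h4]
      have : ((m:Int) + 1 - 0).toNat = m + 1 := by omega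
      rw [this]
      push_cast
      ring

lemma trick_brute_alt_char (nums : List Int) (n : Int) (h : ¬ n > 60) :
    trick_brute_alt nums n = if (colVals nums n).Nodup then "YES" else "NO" := by
  simp only [trick_brute_alt, if_neg h]
  by_cases hn : n < 0
  · rw [PySem.List.pyRange_one_eq_nil (by omega : n ≤ 0)]
    rw [show colVals nums n = [] by
      unfold colVals; rw [PySem.List.pyRange_one_eq_nil (by omega : n ≤ 0)]; rfl]
    simp [PySem.Set.empty, PySem.Set.len]
  · obtain ⟨h1, h2, -, h4⟩ := alt_inv nums n.toNat
    rw [Int.toNat_of_nonneg (by omega : (0:Int) ≤ n)] at h1 h2 h4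
    set st := (PySem.List.pyRange 0 n 1).foldl
      (fun (st : PySem.Set Int × PySem.Set Int × Int) j =>
        let x := PySem.List.pyGetD nums j 0
        let cur := PySem.Set.add (PySem.Set.ofList (st.2.1.map (fun v => PySem.Int.bor x v))) x
        (PySem.Set.union st.1 cur, cur, st.2.2 + j + 1))
      (PySem.Set.empty, PySem.Set.empty, 0) with hst
    have hperm : List.Perm st.1 (colVals nums n).dedup :=
      (List.perm_ext_iff_of_nodup h1 (colVals nums n).nodup_dedup).mpr
        (fun a => (h2 a).trans (List.mem_dedup).symm)
    have hlen := hperm.length_eq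
    by_cases hc : (colVals nums n).Nodup
    · rw [if_pos hc, if_pos]
      rw [h4]
      show ((st.1.length : Nat) : Int) = _
      rw [hlen, List.dedup_eq_self.mpr hc]
    · rw [if_neg hc, if_neg]
      intro heq
      rw [h4] at heq
      have heq' : st.1.length = (colVals nums n).length := by
        simp only [PySem.Set.len] at heq
        exact_mod_cast heq
      rw [hlen] at heq'
      have hde := List.Sublist.eq_of_length (List.dedup_sublist (colVals nums n)) heq'
      exact hc (hde ▸ (colVals nums n).nodup_dedup)

-- index pairs (i, j), 0 ≤ i ≤ j < n, in A's (row-major) and B's (column-major) orders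
def pairsP (n : Int) : List (Int × Int) :=
  (PySem.List.pyRange 0 n 1).flatMap
    (fun i => (PySem.List.pyRange i n 1).map (fun j => (i, j)))

def pairsQ (n : Int) : List (Int × Int) :=
  (PySem.List.pyRange 0 n 1).flatMap
    (fun j => (PySem.List.pyRange 0 (j + 1) 1).map (fun i => (i, j)))

lemma rowVals_eq (nums : List Int) (n : Int) :
    rowVals nums n = (pairsP n).map (fun p => vOr nums p.1 p.2) := by
  unfold rowVals pairsP
  rw [List.map_flatMap]
  congr 1
  funext i
  rw [List.map_map]
  have h := prefOrs_eq_map nums i i n le_rfl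
  rw [vOr_base nums i] at h
  rw [h]
  rfl

lemma colVals_eq (nums : List Int) (n : Int) :
    colVals nums n = (pairsQ n).map (fun p => vOr nums p.1 p.2) := by
  unfold colVals pairsQ
  rw [List.map_flatMap]
  congr 1
  funext j
  rw [List.map_map]
  rfl

lemma pairs_perm (n : Int) : (pairsP n).Perm (pairsQ n) := by
  have hP : (pairsP n).Nodup := by
    rw [pairsP, List.nodup_flatMap]
    constructor
    · intro i _
      exact (PySem.List.nodup_pyRange_one i n).map
        (fun a b hab => by simpa using congrArg Prod.snd hab)
    · refine (PySem.List.pairwise_lt_pyRange_one 0 n).imp ?_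
      intro a b hab p hp hp'
      obtain ⟨j, -, rfl⟩ := List.mem_map.mp hp
      obtain ⟨j', -, hj'⟩ := List.mem_map.mp hp'
      exact absurd (congrArg Prod.fst hj').symm (by simpa using hab.ne)
  have hQ : (pairsQ n).Nodup := by
    rw [pairsQ, List.nodup_flatMap]
    constructor
    · intro j _
      exact (PySem.List.nodup_pyRange_one 0 (j + 1)).map
        (fun a b hab => by simpa using congrArg Prod.fst hab)
    · refine (PySem.List.pairwise_lt_pyRange_one 0 n).imp ?_
      intro a b hab p hp hp'
      obtain ⟨i, -, rfl⟩ := List.mem_map.mp hp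
      obtain ⟨i', -, hi'⟩ := List.mem_map.mp hp'
      exact absurd (congrArg Prod.snd hi').symm (by simpa using hab.ne)
  have memP : ∀ a b : Int, ((a, b) ∈ pairsP n ↔ (0 ≤ a ∧ a ≤ b ∧ b < n)) := by
    intro a b
    unfold pairsP
    rw [List.mem_flatMap]
    constructor
    · rintro ⟨i, hi, hm⟩
      obtain ⟨j, hj, hji⟩ := List.mem_map.mp hm
      obtain ⟨hi0, hin⟩ := PySem.List.mem_pyRange_one.mp hi
      obtain ⟨hji0, hjn⟩ := PySem.List.mem_pyRange_one.mp hj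
      have ha : i = a := congrArg Prod.fst hji
      have hb : j = b := congrArg Prod.snd hji
      subst ha
      subst hb
      exact ⟨hi0, hji0, hjn⟩
    · rintro ⟨ha0, hab, hbn⟩
      exact ⟨a, PySem.List.mem_pyRange_one.mpr ⟨ha0, by omega⟩,
        List.mem_map.mpr ⟨b, PySem.List.mem_pyRange_one.mpr ⟨hab, hbn⟩, rfl⟩⟩
  have memQ : ∀ a b : Int, ((a, b) ∈ pairsQ n ↔ (0 ≤ a ∧ a ≤ b ∧ b < n)) := by
    intro a b
    unfold pairsQ
    rw [List.mem_flatMap]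
    constructor
    · rintro ⟨j, hj, hm⟩
      obtain ⟨i, hi, hij⟩ := List.mem_map.mp hm
      obtain ⟨hj0, hjn⟩ := PySem.List.mem_pyRange_one.mp hj
      obtain ⟨hi0, hij1⟩ := PySem.List.mem_pyRange_one.mp hi
      have ha : i = a := congrArg Prod.fst hij
      have hb : j = b := congrArg Prod.snd hij
      subst ha
      subst hb
      exact ⟨hi0, by omega, hjn⟩
    · rintro ⟨ha0, hab, hbn⟩
      exact ⟨b, PySem.List.mem_pyRange_one.mpr ⟨by omega, hbn⟩,
        List.mem_map.mpr ⟨a, PySem.List.mem_pyRange_one.mpr ⟨ha0, by omega⟩, rfl⟩⟩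
  refine (List.perm_ext_iff_of_nodup hP hQ).mpr ?_
  rintro ⟨a, b⟩
  rw [memP, memQ]

-- the two traversal orders enumerate the same multiset of subarray ORs
lemma rowVals_perm_colVals (nums : List Int) (n : Int) :
    (rowVals nums n).Perm (colVals nums n) := by
  rw [rowVals_eq, colVals_eq]
  exact (pairs_perm n).map _

-- ===== VERDICT (by name: the statement is the Claim_ definition above) =====
theorem trick_brute_spec : Claim_equal_trick_brute := by
  intro nums n _ _
  unfold Spec_trick_brute
  by_cases h : n > 60
  · simp [trick_brute, trick_brute_alt, h]
  · rw [trick_brute_char nums n h, trick_brute_alt_char nums n h]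
    have hp := (rowVals_perm_colVals nums n).nodup_iff
    by_cases hc : (colVals nums n).Nodup
    · rw [if_pos (hp.mpr hc), if_pos hc]
    · rw [if_neg (fun hr => hc (hp.mp hr)), if_neg hc]
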